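-- pv_equiv track=rewrite | github.com/Namratabhatt/Competitive-Codes | Codeforces/Hello 2020/problemB.py | check
-- ===== SOURCE A (Python) =====
-- def check(arr):
--     if len(arr) == 1:
--         return False
--     else:
--         for i in range(1, len(arr)):
--             if arr[i]>arr[i-1]:
--                 return True
--         return False
-- ===== SOURCE B (Python) =====
-- def check(arr):
--     return arr != sorted(arr, reverse=True)
-- ===== Notes on version B (the rewrite author's own statement) =====
-- stated objective: simpler
-- what changed: Replaces the explicit index loop over adjacent pairs by a one-line comparison of the list with its descending sort: a list has an element exceeding its predecessor exactly when it is not equal to sorted(arr, reverse=True).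
import Mathlib
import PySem

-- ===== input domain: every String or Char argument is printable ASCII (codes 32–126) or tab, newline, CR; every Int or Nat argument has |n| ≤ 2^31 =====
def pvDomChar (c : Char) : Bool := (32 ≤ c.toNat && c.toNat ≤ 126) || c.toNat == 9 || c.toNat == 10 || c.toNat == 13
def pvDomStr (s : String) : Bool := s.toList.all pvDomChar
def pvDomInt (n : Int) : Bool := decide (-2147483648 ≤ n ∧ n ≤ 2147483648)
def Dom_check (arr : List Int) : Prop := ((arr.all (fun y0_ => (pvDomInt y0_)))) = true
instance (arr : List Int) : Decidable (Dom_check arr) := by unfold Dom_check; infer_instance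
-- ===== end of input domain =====

-- B replaces A's adjacent-pair index scan by comparing the list with its descending sort
-- (equal iff non-increasing iff no element exceeds its predecessor); objective: simpler.
-- ===== PORT A =====
-- helper: the 'for i in range(1, len(arr))' loop with early return True
def checkScan (arr : List Int) : List Int → Bool
  | [] => false
  | i :: rest =>
    if PySem.List.pyGetD arr i 0 > PySem.List.pyGetD arr (i - 1) 0 then true
    else checkScan arr rest

def check (arr : List Int) : Bool :=
  if PySem.List.len arr == 1 then false
  else checkScan arr (PySem.List.pyRange 1 (PySem.List.len arr) 1)

-- ===== PORT B =====
-- B: arr != sorted(arr, reverse=True)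
def check_alt (arr : List Int) : Bool :=
  decide (arr ≠ PySem.List.sorted arr (fun x => x) true)

-- ===== PRECONDITION & SPEC =====
def Spec_check (arr : List Int) (out : Bool) : Prop := out = check_alt arr
instance (arr : List Int) (out : Bool) : Decidable (Spec_check arr out) := by unfold Spec_check; infer_instance

-- ===== CLAIM (what is proved, stated in full; the proofs are below) =====
def Claim_equal_check : Prop := ∀ (arr : List Int), Dom_check arr → Spec_check arr (check arr)

-- ===== LEMMAS AND PROOFS =====

-- the scan over range(j, n) finds an adjacent increase iff one exists with index in [j, n)
theorem checkScan_iff (arr : List Int) (j n : Int) :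
    checkScan arr (PySem.List.pyRange j n 1) = true ↔
      ∃ i : Int, j ≤ i ∧ i < n ∧
        PySem.List.pyGetD arr i 0 > PySem.List.pyGetD arr (i - 1) 0 := by
  by_cases h : j < n
  · rw [PySem.List.pyRange_one_cons h]
    simp only [checkScan]
    split_ifs with hgt
    · simp only [true_iff]
      exact ⟨j, le_refl j, h, hgt⟩
    · rw [checkScan_iff arr (j + 1) n]
      constructor
      · rintro ⟨i, h1, h2, h3⟩; exact ⟨i, by omega, h2, h3⟩
      · rintro ⟨i, h1, h2, h3⟩
        refine ⟨i, ?_, h2, h3⟩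
        rcases eq_or_lt_of_le h1 with rfl | h1
        · exact absurd h3 hgt
        · omega
  · rw [PySem.List.pyRange_one_eq_nil (by omega)]
    refine iff_of_false (by simp [checkScan]) ?_
    rintro ⟨i, h1, h2, _⟩; omega
termination_by (n - j).toNat
decreasing_by omega

-- A returns true iff some adjacent pair increases
theorem check_iff (arr : List Int) :
    check arr = true ↔
      ∃ k : Nat, k + 1 < arr.length ∧ arr.getD k 0 < arr.getD (k + 1) 0 := by
  unfold check
  by_cases h1 : (PySem.List.len arr == 1) = true
  · rw [if_pos h1]
    refine iff_of_false (by simp) ?_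
    rintro ⟨k, hk, _⟩
    simp only [PySem.List.len_eq, beq_iff_eq] at h1
    omega
  · rw [if_neg h1]
    rw [checkScan_iff]
    simp only [PySem.List.len_eq]
    constructor
    · rintro ⟨i, h1i, h2i, h3i⟩
      obtain ⟨k, hk⟩ : ∃ k : Nat, i - 1 = (k : Int) := ⟨(i - 1).toNat, by omega⟩
      refine ⟨k, by omega, ?_⟩
      rw [hk, show i = ((k + 1 : Nat) : Int) by push_cast; omega] at h3i
      simp only [PySem.List.pyGetD_natCast] at h3i
      exact h3i
    · rintro ⟨k, hk, hlt⟩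
      refine ⟨(k : Int) + 1, by omega, by omega, ?_⟩
      rw [show (k : Int) + 1 - 1 = (k : Int) by ring,
        show (k : Int) + 1 = ((k + 1 : Nat) : Int) by push_cast; ring]
      simp only [PySem.List.pyGetD_natCast]
      exact hlt

-- B returns true iff some adjacent pair increases
theorem check_alt_iff (arr : List Int) :
    check_alt arr = true ↔
      ∃ k : Nat, k + 1 < arr.length ∧ arr.getD k 0 < arr.getD (k + 1) 0 := by
  unfold check_alt
  rw [decide_eq_true_iff]
  rw [not_iff_comm]
  have hkey : arr = PySem.List.sorted arr (fun x => x) true ↔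
      arr.IsChain (fun a b : Int => b ≤ a) := by
    constructor
    · intro heq
      apply List.isChain_iff_pairwise.mpr
      rw [heq]
      exact PySem.List.sorted_pairwise_rev arr (fun x => x)
    · intro hch
      exact (PySem.List.sorted_rev_eq_self_of_pairwise arr (fun x => x)
        (List.isChain_iff_pairwise.mp hch)).symm
  rw [hkey, List.isChain_iff_getElem]
  constructor
  · intro h i hi
    by_contra hlt
    apply h
    refine ⟨i, hi, ?_⟩
    rw [List.getD_eq_getElem arr 0 (by omega : i < arr.length),
      List.getD_eq_getElem arr 0 hi]
    omega
  · intro h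
    rintro ⟨k, hk, hlt⟩
    have := h k hk
    rw [List.getD_eq_getElem arr 0 (by omega : k < arr.length),
      List.getD_eq_getElem arr 0 hk] at hlt
    omega

-- ===== VERDICT (by name: the statement is the Claim_ definition above) =====
theorem check_spec : Claim_equal_check := by
  intro arr _
  unfold Spec_check
  rw [Bool.eq_iff_iff, check_iff, check_alt_iff]
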